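-- pv_equiv track=rewrite | github.com/davidar/oeisdata | verified/prog/Python/A028/A028982b.py | A028982
-- ===== SOURCE A (Python) =====
-- from math import isqrt
--
-- def A028982(n):
--     def f(x): return n-1+x-isqrt(x)-isqrt(x>>1)
--     kmin, kmax = 1,2
--     while f(kmax) >= kmax:
--         kmax <<= 1
--     while True:
--         kmid = kmax+kmin>>1
--         if f(kmid) < kmid:
--             kmax = kmid
--         else:
--             kmin = kmid
--         if kmax-kmin <= 1:
--             break
--     return kmax # _Chai Wah Wu_, Aug 22 2024
-- ===== SOURCE B (Python) =====
-- from math import isqrt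
--
-- def A028982(n):
--     # Closed form: the indices of squares i*i form the Beatty sequence i + isqrt(i*i//2),
--     # those of 2*j*j the complementary one j + isqrt(2*j*j); invert whichever contains m.
--     m = max(n, 1)
--     i = 2 * m - isqrt(2 * m * m)
--     if i + isqrt(i * i >> 1) == m:
--         return i * i
--     j = isqrt(2 * (m + 1) * (m + 1)) - (m + 1)
--     return 2 * j * j
-- ===== Notes on version B (the rewrite author's own statement) =====
-- stated objective: faster
-- what changed: A locates the n-th square-or-twice-square by exponential then binary search on the counting function n-1+x-isqrt(x)-isqrt(x>>1); B computes it in closed form by inverting the two complementary Beatty index sequences i+isqrt(i*i//2) and j+isqrt(2*j*j) with a constant number of isqrt calls and no search loop.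
import Mathlib
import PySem

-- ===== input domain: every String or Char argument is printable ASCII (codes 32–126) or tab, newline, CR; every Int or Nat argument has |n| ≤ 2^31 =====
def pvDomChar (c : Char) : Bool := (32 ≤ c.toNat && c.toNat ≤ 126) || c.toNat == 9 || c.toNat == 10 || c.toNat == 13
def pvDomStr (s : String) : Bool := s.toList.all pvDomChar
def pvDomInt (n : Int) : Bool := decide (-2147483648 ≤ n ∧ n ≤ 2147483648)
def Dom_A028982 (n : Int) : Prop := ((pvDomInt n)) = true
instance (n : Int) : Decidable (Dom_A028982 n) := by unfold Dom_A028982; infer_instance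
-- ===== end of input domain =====

-- B replaces A's exponential-search + binary-search on the counting function by a closed
-- form: it inverts the two complementary Beatty index sequences with a few isqrt calls.

-- ===== PORT A =====
-- A's inner helper f(x) = n-1+x-isqrt(x)-isqrt(x>>1); Int.sqrt z = Nat.sqrt z.toNat equals
-- Python's isqrt on the nonnegative arguments A ever passes it.
def pvF (n x : Int) : Int := n - 1 + x - Int.sqrt x - Int.sqrt (x >>> (1:Nat))

-- termination helper for the first while loop (cited by its decreasing_by)
lemma pvLoop1_bound {n kmax : Int} (h0 : ¬ kmax ≤ 0) (h : pvF n kmax ≥ kmax) : kmax < n * n := by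
  have hs : (0:Int) ≤ Int.sqrt (kmax >>> (1:Nat)) := Int.sqrt_nonneg _
  have h1 : Int.sqrt kmax ≤ n - 1 := by unfold pvF at h; omega
  have h2 : Int.sqrt kmax = (Nat.sqrt kmax.toNat : Int) := rfl
  have h3 : (kmax.toNat : Int) < ((Nat.sqrt kmax.toNat : Int) + 1) * ((Nat.sqrt kmax.toNat : Int) + 1) := by
    exact_mod_cast Nat.lt_succ_sqrt kmax.toNat
  have hsn : (0:Int) ≤ (Nat.sqrt kmax.toNat : Int) := Int.natCast_nonneg _
  have h4 : (Nat.sqrt kmax.toNat : Int) + 1 ≤ n := by omega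
  have h6 : ((Nat.sqrt kmax.toNat : Int) + 1) * ((Nat.sqrt kmax.toNat : Int) + 1) ≤ n * n :=
    mul_le_mul h4 h4 (by omega) (by omega)
  have h7 : (kmax.toNat : Int) = kmax := Int.toNat_of_nonneg (by omega)
  omega

-- while f(kmax) >= kmax: kmax <<= 1   (the 'kmax ≤ 0' test is only a totality guard:
-- A calls this with kmax = 2 and kmax only doubles)
def pvLoop1 (n kmax : Int) : Int :=
  if _h0 : kmax ≤ 0 then kmax
  else if _h : pvF n kmax ≥ kmax then pvLoop1 n (kmax <<< (1:Nat)) else kmax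
termination_by (2 * (n * n) + 4 - kmax).toNat
decreasing_by
  have hb := pvLoop1_bound _h0 _h
  have hsh : kmax <<< (1:Nat) = kmax * 2 := by
    have := Int.shiftLeft_eq kmax 1; norm_num at this; omega
  omega

-- while True: kmid = kmax+kmin>>1; ... (break when kmax-kmin <= 1)
def pvLoop2 (n kmin kmax : Int) : Int :=
  let kmid := (kmax + kmin) >>> (1:Nat)
  if pvF n kmid < kmid then
    if kmid - kmin ≤ 1 then kmid else pvLoop2 n kmin kmid
  else
    if kmax - kmid ≤ 1 then kmax else pvLoop2 n kmid kmax
termination_by (kmax - kmin).toNat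
decreasing_by
  · have h : (kmax + kmin) >>> (1:Nat) = (kmax + kmin) / 2 := by
      have := Int.shiftRight_eq_div_pow (kmax + kmin) 1; norm_num at this; omega
    simp only [kmid] at *
    omega
  · have h : (kmax + kmin) >>> (1:Nat) = (kmax + kmin) / 2 := by
      have := Int.shiftRight_eq_div_pow (kmax + kmin) 1; norm_num at this; omega
    simp only [kmid] at *
    omega

def A028982 (n : Int) : Int := pvLoop2 n 1 (pvLoop1 n 2)

-- ===== PORT B =====
-- m = max(n,1); i = 2*m - isqrt(2*m*m); if i + isqrt(i*i>>1) == m: return i*i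
-- else j = isqrt(2*(m+1)*(m+1)) - (m+1); return 2*j*j
def A028982_alt (n : Int) : Int :=
  let m := max n 1
  let i := 2 * m - Int.sqrt (2 * (m * m))
  if i + Int.sqrt ((i * i) >>> (1:Nat)) = m then i * i
  else
    let j := Int.sqrt (2 * ((m + 1) * (m + 1))) - (m + 1)
    2 * (j * j)

-- ===== PRECONDITION & SPEC =====
def Spec_A028982 (n : Int) (out : Int) : Prop := out = A028982_alt n
instance (n : Int) (out : Int) : Decidable (Spec_A028982 n out) := by unfold Spec_A028982; infer_instance

-- ===== CLAIM (what is proved, stated in full; the proofs are below) =====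
def Claim_equal_A028982 : Prop := ∀ (n : Int), Dom_A028982 n → Spec_A028982 n (A028982 n)

-- ===== LEMMAS AND PROOFS =====
-- pvCnt k counts the squares and twice-squares in (0,k]; for n ≥ 2 both programs return
-- the unique k with pvCnt (k-1) < n ≤ pvCnt k, and both return 1 for n ≤ 1.
def pvCnt (k : Int) : Int := (Nat.sqrt k.toNat : Int) + (Nat.sqrt (k.toNat / 2) : Int)

lemma pvCnt_mono {a b : Int} (h : a ≤ b) : pvCnt a ≤ pvCnt b := by
  unfold pvCnt
  have h1 : Nat.sqrt a.toNat ≤ Nat.sqrt b.toNat := Nat.sqrt_le_sqrt (by omega)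
  have h2 : Nat.sqrt (a.toNat / 2) ≤ Nat.sqrt (b.toNat / 2) := Nat.sqrt_le_sqrt (by omega)
  omega

lemma pvF_lt_iff {n x : Int} (hx : 0 ≤ x) : pvF n x < x ↔ n ≤ pvCnt x := by
  have hsh : x >>> (1:Nat) = x / 2 := by
    have := Int.shiftRight_eq_div_pow x 1; norm_num at this; omega
  have h1 : Int.sqrt x = (Nat.sqrt x.toNat : Int) := rfl
  have h2 : Int.sqrt (x >>> (1:Nat)) = (Nat.sqrt (x.toNat / 2) : Int) := by
    rw [hsh]
    have : (x / 2).toNat = x.toNat / 2 := by omega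
    show ((Nat.sqrt (x/2).toNat : Nat) : Int) = _
    rw [this]
  unfold pvF pvCnt
  omega

lemma pv_unique {n r v : Int} (hr1 : n ≤ pvCnt r) (hr2 : pvCnt (r-1) < n)
    (hv1 : n ≤ pvCnt v) (hv2 : pvCnt (v-1) < n) : r = v := by
  rcases lt_trichotomy r v with h | h | h
  · have := pvCnt_mono (show r ≤ v - 1 by omega); omega
  · exact h
  · have := pvCnt_mono (show v ≤ r - 1 by omega); omega

lemma pvLoop1_spec (n : Int) : ∀ kmax : Int, 2 ≤ kmax →
    2 ≤ pvLoop1 n kmax ∧ n ≤ pvCnt (pvLoop1 n kmax) := by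
  intro kmax hk
  fun_induction pvLoop1 n kmax with
  | case1 kmax h0 => omega
  | case2 kmax h0 h ih =>
    apply ih
    have : kmax <<< (1:Nat) = kmax * 2 := by
      have := Int.shiftLeft_eq kmax 1; norm_num at this; omega
    omega
  | case3 kmax h0 h =>
    exact ⟨hk, (pvF_lt_iff (by omega)).mp (by omega)⟩

lemma pvLoop2_spec (n : Int) : ∀ g : Nat, ∀ kmin kmax : Int, (kmax - kmin).toNat = g →
    1 ≤ kmin → kmin < kmax → pvCnt kmin < n → n ≤ pvCnt kmax →
    n ≤ pvCnt (pvLoop2 n kmin kmax) ∧ pvCnt (pvLoop2 n kmin kmax - 1) < n := by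
  intro g
  induction g using Nat.strong_induction_on with
  | _ g ih =>
    intro kmin kmax hg h1 h2 h3 h4
    rw [pvLoop2]
    have hsh : (kmax + kmin) >>> (1:Nat) = (kmax + kmin) / 2 := by
      have := Int.shiftRight_eq_div_pow (kmax + kmin) 1; norm_num at this; omega
    rw [hsh]
    set kmid := (kmax + kmin) / 2 with hmid
    have hb1 : 2 * kmid ≤ kmax + kmin := by omega
    have hb2 : kmax + kmin ≤ 2 * kmid + 1 := by omega
    have hklo : kmin ≤ kmid := by omega
    have hkhi : kmid < kmax := by omega
    split_ifs with hlt hle hle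
    · -- return kmid, cnt kmid ≥ n, gap small
      have hcnt : n ≤ pvCnt kmid := (pvF_lt_iff (by omega)).mp hlt
      have hne : kmid ≠ kmin := by
        intro h; rw [h] at hcnt; omega
      have : kmid = kmin + 1 := by omega
      refine ⟨hcnt, ?_⟩
      rw [this]; simpa using h3
    · -- recurse on (kmin, kmid)
      have hcnt : n ≤ pvCnt kmid := (pvF_lt_iff (by omega)).mp hlt
      exact ih (kmid - kmin).toNat (by omega) kmin kmid rfl h1 (by omega) h3 hcnt
    · -- return kmax, ¬(cnt kmid ≥ n), kmax = kmid + 1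
      have hcnt : pvCnt kmid < n := by
        have := (pvF_lt_iff (show (0:Int) ≤ kmid by omega) (n := n)).not.mp hlt
        omega
      have : kmax = kmid + 1 := by omega
      refine ⟨h4, ?_⟩
      rw [this]; simpa using hcnt
    · -- recurse on (kmid, kmax)
      have hcnt : pvCnt kmid < n := by
        have := (pvF_lt_iff (show (0:Int) ≤ kmid by omega) (n := n)).not.mp hlt
        omega
      exact ih (kmax - kmid).toNat (by omega) kmid kmax rfl (by omega) hkhi hcnt h4

lemma nat_no_sq_two : ∀ j : Nat, ∀ i : Nat, i * i = 2 * (j * j) → j = 0 := by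
  intro j
  induction j using Nat.strong_induction_on with
  | _ j ih =>
    intro i h
    rcases Nat.even_or_odd i with he | ho
    · obtain ⟨k, hk⟩ := he
      subst hk
      have e : (k + k) * (k + k) = 4 * (k * k) := by ring
      rw [e] at h
      by_cases hj : j = 0
      · exact hj
      · have hjk : j * j = 2 * (k * k) := by omega
        have hj1 : 1 ≤ j * j := Nat.mul_le_mul (Nat.pos_of_ne_zero hj) (Nat.pos_of_ne_zero hj)
        have hkj : k < j := by
          by_contra h'
          have h'' : j ≤ k := Nat.le_of_not_lt h'
          have : j * j ≤ k * k := Nat.mul_le_mul h'' h''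
          omega
        have hk0 := ih k hkj j hjk
        subst hk0
        simp at hjk
        omega
    · exfalso
      obtain ⟨k, hk⟩ := ho
      subst hk
      have e : (2 * k + 1) * (2 * k + 1) = 2 * (2 * (k * k) + 2 * k) + 1 := by ring
      rw [e] at h
      omega

lemma int_no_sq_two {i j : Int} (hj : 1 ≤ j) : i * i ≠ 2 * (j * j) := by
  intro h
  have h1 : ((i.natAbs * i.natAbs : Nat) : Int) = i * i := Int.natAbs_mul_self
  have h2 : ((j.natAbs * j.natAbs : Nat) : Int) = j * j := Int.natAbs_mul_self
  have h3 : i.natAbs * i.natAbs = 2 * (j.natAbs * j.natAbs) := by omega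
  have := nat_no_sq_two j.natAbs i.natAbs h3
  omega

lemma sqrt_eq_of {a n : Nat} (h1 : a * a ≤ n) (h2 : n < (a+1) * (a+1)) : Nat.sqrt n = a := by
  have h3 : a ≤ Nat.sqrt n := Nat.le_sqrt.mpr h1
  have h4 : Nat.sqrt n < a + 1 := by
    by_contra h'
    have h5 : (a+1) * (a+1) ≤ Nat.sqrt n * Nat.sqrt n := Nat.mul_le_mul (by omega) (by omega)
    have h6 := Nat.sqrt_le n
    omega
  omega

lemma sqrt_toNat_eq {a t : Int} (ha : 0 ≤ a) (h1 : a * a ≤ t) (h2 : t < (a+1) * (a+1)) :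
    (Nat.sqrt t.toNat : Int) = a := by
  have ht : 0 ≤ t := le_trans (mul_nonneg ha ha) h1
  have hc : (a.toNat : Int) = a := Int.toNat_of_nonneg ha
  have h1' : a.toNat * a.toNat ≤ t.toNat := by
    have : ((a.toNat * a.toNat : Nat) : Int) ≤ t := by push_cast [hc]; exact h1
    omega
  have h2' : t.toNat < (a.toNat + 1) * (a.toNat + 1) := by
    have : t < (((a.toNat + 1) * (a.toNat + 1) : Nat) : Int) := by push_cast [hc]; exact h2
    omega
  rw [sqrt_eq_of h1' h2', hc]

lemma pvCnt_one : pvCnt 1 = 1 := by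
  unfold pvCnt; norm_num

lemma sqrt_shift {x : Int} (hx : 0 ≤ x) :
    Int.sqrt (x >>> (1:Nat)) = (Nat.sqrt (x.toNat / 2) : Int) := by
  have hsh : x >>> (1:Nat) = x / 2 := by
    have := Int.shiftRight_eq_div_pow x 1; norm_num at this; omega
  rw [hsh]
  have : (x / 2).toNat = x.toNat / 2 := by omega
  show ((Nat.sqrt (x/2).toNat : Nat) : Int) = _
  rw [this]

lemma pv_brackets (t : Int) (ht : 0 ≤ t) :
    (Nat.sqrt t.toNat : Int) * (Nat.sqrt t.toNat : Int) ≤ t ∧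
    t < ((Nat.sqrt t.toNat : Int) + 1) * ((Nat.sqrt t.toNat : Int) + 1) := by
  have h1 := Nat.sqrt_le t.toNat
  have h2 := Nat.lt_succ_sqrt t.toNat
  constructor
  · have h3 : ((Nat.sqrt t.toNat * Nat.sqrt t.toNat : Nat) : Int) ≤ (t.toNat : Int) := by
      exact_mod_cast h1
    push_cast at h3; omega
  · have h3 : (t.toNat : Int) < (((Nat.sqrt t.toNat + 1) * (Nat.sqrt t.toNat + 1) : Nat) : Int) := by
      exact_mod_cast h2
    push_cast at h3; omega

lemma pv_half_brackets (t : Int) (ht : 0 ≤ t) :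
    2 * ((Nat.sqrt (t.toNat / 2) : Int) * (Nat.sqrt (t.toNat / 2) : Int)) ≤ t ∧
    t < 2 * (((Nat.sqrt (t.toNat / 2) : Int) + 1) * ((Nat.sqrt (t.toNat / 2) : Int) + 1)) := by
  have h1 := Nat.sqrt_le (t.toNat / 2)
  have h2 := Nat.lt_succ_sqrt (t.toNat / 2)
  constructor
  · have h3 : ((Nat.sqrt (t.toNat/2) * Nat.sqrt (t.toNat/2) : Nat) : Int) ≤ ((t.toNat / 2 : Nat) : Int) := by
      exact_mod_cast h1
    push_cast at h3; omega
  · have h3 : ((t.toNat / 2 : Nat) : Int) < (((Nat.sqrt (t.toNat/2) + 1) * (Nat.sqrt (t.toNat/2) + 1) : Nat) : Int) := by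
      exact_mod_cast h2
    push_cast at h3; omega

lemma cnt_sq (i : Int) (hi : 1 ≤ i) :
    pvCnt (i * i) = i + (Nat.sqrt ((i * i).toNat / 2) : Int) ∧
    pvCnt (i * i - 1) < i + (Nat.sqrt ((i * i).toNat / 2) : Int) := by
  have hii : (1:Int) ≤ i * i := by nlinarith
  have e1 : (Nat.sqrt (i * i).toNat : Int) = i :=
    sqrt_toNat_eq (by omega) (le_refl _) (by nlinarith)
  constructor
  · unfold pvCnt; omega
  · have e2 : (Nat.sqrt (i * i - 1).toNat : Int) = i - 1 := by
      apply sqrt_toNat_eq (by omega)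
      · nlinarith
      · nlinarith
    have e3 : (Nat.sqrt ((i * i - 1).toNat / 2) : Int) ≤ (Nat.sqrt ((i * i).toNat / 2) : Int) := by
      have : Nat.sqrt ((i * i - 1).toNat / 2) ≤ Nat.sqrt ((i * i).toNat / 2) :=
        Nat.sqrt_le_sqrt (by omega)
      omega
    unfold pvCnt; omega

lemma cnt_2sq (j : Int) (hj : 1 ≤ j) :
    pvCnt (2 * (j * j)) = j + (Nat.sqrt (2 * (j * j)).toNat : Int) ∧
    pvCnt (2 * (j * j) - 1) < j + (Nat.sqrt (2 * (j * j)).toNat : Int) := by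
  have hjj : (1:Int) ≤ j * j := by nlinarith
  have e1 : (Nat.sqrt ((2 * (j * j)).toNat / 2) : Int) = j := by
    have : (2 * (j * j)).toNat / 2 = (j * j).toNat := by omega
    rw [this]
    exact sqrt_toNat_eq (by omega) (le_refl _) (by nlinarith)
  have hc := pv_brackets (2 * (j * j)) (by omega)
  set c := (Nat.sqrt (2 * (j * j)).toNat : Int) with hcdef
  have hcn : 0 ≤ c := by positivity
  have hne : c * c ≠ 2 * (j * j) := by
    intro h; exact int_no_sq_two hj h
  constructor
  · unfold pvCnt; omega
  · have e2 : (Nat.sqrt (2 * (j * j) - 1).toNat : Int) = c := by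
      apply sqrt_toNat_eq hcn
      · omega
      · omega
    have e3 : (Nat.sqrt ((2 * (j * j) - 1).toNat / 2) : Int) = j - 1 := by
      have h1 : (2 * (j * j) - 1).toNat / 2 = (j * j).toNat - 1 := by omega
      rw [h1]
      have h2 : ((j * j).toNat - 1 : Nat) = ((j * j - 1 : Int)).toNat := by omega
      rw [h2]
      apply sqrt_toNat_eq (by omega)
      · nlinarith
      · nlinarith
    unfold pvCnt; omega

lemma sqrt_succ_le (a : Nat) : Nat.sqrt (a + 1) ≤ Nat.sqrt a + 1 := by
  by_contra h'
  have h1 : a < (Nat.sqrt a + 1) * (Nat.sqrt a + 1) := Nat.lt_succ_sqrt a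
  have h2 : (Nat.sqrt a + 2) * (Nat.sqrt a + 2) ≤ Nat.sqrt (a+1) * Nat.sqrt (a+1) :=
    Nat.mul_le_mul (by omega) (by omega)
  have h3 := Nat.sqrt_le (a + 1)
  nlinarith

lemma sqrt_jump' {a b : Nat} (hb : b = a + 1) (h : Nat.sqrt a < Nat.sqrt b) :
    b = Nat.sqrt b * Nat.sqrt b := by
  have h1 := Nat.sqrt_le b
  have h2 : a < (Nat.sqrt a + 1) * (Nat.sqrt a + 1) := Nat.lt_succ_sqrt a
  have h3 : (Nat.sqrt a + 1) * (Nat.sqrt a + 1) ≤ Nat.sqrt b * Nat.sqrt b :=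
    Nat.mul_le_mul (by omega) (by omega)
  omega

lemma cnt_step (k : Int) (hk : 1 ≤ k) : pvCnt k ≤ pvCnt (k - 1) + 1 := by
  unfold pvCnt
  have hK : k.toNat = (k - 1).toNat + 1 := by omega
  by_contra hcon
  have m1 : Nat.sqrt (k-1).toNat ≤ Nat.sqrt k.toNat := Nat.sqrt_le_sqrt (by omega)
  have m2 : Nat.sqrt ((k-1).toNat / 2) ≤ Nat.sqrt (k.toNat / 2) := Nat.sqrt_le_sqrt (by omega)
  have u1 : Nat.sqrt k.toNat ≤ Nat.sqrt (k-1).toNat + 1 := by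
    rw [hK]; exact sqrt_succ_le (k-1).toNat
  have u2 : Nat.sqrt (k.toNat / 2) ≤ Nat.sqrt ((k-1).toNat / 2) + 1 := by
    calc Nat.sqrt (k.toNat / 2) ≤ Nat.sqrt ((k-1).toNat / 2 + 1) := Nat.sqrt_le_sqrt (by omega)
    _ ≤ Nat.sqrt ((k-1).toNat / 2) + 1 := sqrt_succ_le _
  have hs : Nat.sqrt k.toNat = Nat.sqrt (k-1).toNat + 1 := by omega
  have hh : Nat.sqrt (k.toNat / 2) = Nat.sqrt ((k-1).toNat / 2) + 1 := by omega
  have hj1 : k.toNat = Nat.sqrt k.toNat * Nat.sqrt k.toNat := sqrt_jump' hK (by omega)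
  have hhalf : k.toNat / 2 = (k-1).toNat / 2 + 1 := by
    by_contra h'
    have he : k.toNat / 2 = (k-1).toNat / 2 := by omega
    rw [he] at hh
    omega
  have hj2 : k.toNat / 2 = Nat.sqrt (k.toNat / 2) * Nat.sqrt (k.toNat / 2) :=
    sqrt_jump' hhalf (by omega)
  have heq : Nat.sqrt k.toNat * Nat.sqrt k.toNat = 2 * (Nat.sqrt (k.toNat / 2) * Nat.sqrt (k.toNat / 2)) := by
    omega
  have := nat_no_sq_two (Nat.sqrt (k.toNat / 2)) (Nat.sqrt k.toNat) heq
  omega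

lemma cnt_nonpos {k : Int} (hk : k ≤ 0) : pvCnt k = 0 := by
  unfold pvCnt
  have : k.toNat = 0 := by omega
  rw [this]
  norm_num

lemma classify (k n : Int) (hk : 1 ≤ k) (h1 : pvCnt k = n) (h2 : pvCnt (k - 1) < n) :
    (∃ i : Int, 1 ≤ i ∧ k = i * i) ∨ (∃ j : Int, 1 ≤ j ∧ k = 2 * (j * j)) := by
  have hK : k.toNat = (k - 1).toNat + 1 := by omega
  have hjump : pvCnt (k-1) < pvCnt k := by omega
  unfold pvCnt at hjump
  have m1 : Nat.sqrt (k-1).toNat ≤ Nat.sqrt k.toNat := Nat.sqrt_le_sqrt (by omega)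
  have m2 : Nat.sqrt ((k-1).toNat / 2) ≤ Nat.sqrt (k.toNat / 2) := Nat.sqrt_le_sqrt (by omega)
  rcases Nat.lt_or_ge (Nat.sqrt (k-1).toNat) (Nat.sqrt k.toNat) with hs | hs
  · left
    refine ⟨(Nat.sqrt k.toNat : Int), ?_, ?_⟩
    · have : 1 ≤ Nat.sqrt k.toNat := by
        have := Nat.sqrt_le k.toNat
        rcases Nat.eq_zero_or_pos (Nat.sqrt k.toNat) with h0 | h0
        · have h2' := Nat.lt_succ_sqrt k.toNat
          rw [h0] at h2'
          omega
        · omega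
      omega
    · have := sqrt_jump' hK hs
      omega
  · right
    have hh : Nat.sqrt ((k-1).toNat / 2) < Nat.sqrt (k.toNat / 2) := by omega
    have hhalf : k.toNat / 2 = (k-1).toNat / 2 + 1 := by
      by_contra h'
      have he : k.toNat / 2 = (k-1).toNat / 2 := by omega
      rw [he] at hh
      omega
    have hj2 : k.toNat / 2 = Nat.sqrt (k.toNat / 2) * Nat.sqrt (k.toNat / 2) :=
      sqrt_jump' hhalf (by omega)
    have heven : k.toNat = 2 * (k.toNat / 2) := by omega
    refine ⟨(Nat.sqrt (k.toNat / 2) : Int), by omega, by omega⟩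

lemma inv1 {i b m : Int} (hi : 1 ≤ i) (hb : 0 ≤ b)
    (hl : 2 * (b * b) ≤ i * i) (hu : i * i < 2 * ((b + 1) * (b + 1))) (hm : m = i + b) :
    (Nat.sqrt (2 * (m * m)).toNat : Int) = i + 2 * b := by
  apply sqrt_toNat_eq (by omega)
  · nlinarith
  · nlinarith

lemma inv2 {j c m : Int} (hj : 1 ≤ j) (hc : 0 ≤ c)
    (hl : c * c ≤ 2 * (j * j)) (hu : 2 * (j * j) < (c + 1) * (c + 1)) (hm : m = j + c) :
    (Nat.sqrt (2 * ((m + 1) * (m + 1))).toNat : Int) = m + 1 + j := by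
  apply sqrt_toNat_eq (by omega)
  · nlinarith
  · nlinarith

lemma i0_pos {m : Int} (hm : 1 ≤ m) : 1 ≤ 2 * m - (Nat.sqrt (2 * (m * m)).toNat : Int) := by
  have hb := pv_brackets (2 * (m * m)) (by positivity)
  set s := (Nat.sqrt (2 * (m * m)).toNat : Int) with hs
  have hsn : 0 ≤ s := by positivity
  nlinarith [hb.1]

lemma altB_small {n : Int} (hn : n ≤ 1) : A028982_alt n = 1 := by
  simp only [A028982_alt]
  rw [max_eq_right (by omega : n ≤ (1:Int))]
  norm_num [show ((1:Int)*1) >>> (1:Nat) = 0 from by decide, Int.sqrt, Int.toNat]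

lemma pv_main (n : Int) : A028982 n = A028982_alt n := by
  by_cases hn : n ≤ 1
  · -- both sides are 1
    rw [altB_small hn]
    unfold A028982
    have hA1 : pvLoop1 n 2 = 2 := by
      rw [pvLoop1]
      have hf : pvF n 2 = n - 1 := by
        unfold pvF
        rw [show ((2:Int) >>> (1:Nat)) = 1 from by decide,
          show Int.sqrt 2 = 1 from by simp [Int.sqrt],
          show Int.sqrt 1 = 1 from by simp [Int.sqrt]]
        ring
      rw [hf]
      norm_num
      omega
    rw [hA1]
    rw [pvLoop2]
    simp only [show ((2:Int) + 1) >>> (1:Nat) = 1 from by decide]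
    have hf1 : pvF n 1 = n - 1 := by
      unfold pvF
      rw [show ((1:Int) >>> (1:Nat)) = 0 from by decide,
        show Int.sqrt 1 = 1 from by simp [Int.sqrt],
        show Int.sqrt 0 = 0 from by simp [Int.sqrt]]
      ring
    rw [hf1, if_pos (by omega : n - 1 < 1), if_pos (by norm_num : (1:Int) - 1 ≤ 1)]
  · have hn2 : 2 ≤ n := by omega
    obtain ⟨hK2, hKc⟩ := pvLoop1_spec n 2 (le_refl 2)
    have hc1 : pvCnt 1 < n := by rw [pvCnt_one]; omega
    obtain ⟨hr1, hr2⟩ := pvLoop2_spec n (pvLoop1 n 2 - 1).toNat 1 (pvLoop1 n 2) rfl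
      (le_refl 1) (by omega) hc1 hKc
    unfold A028982
    set k := pvLoop2 n 1 (pvLoop1 n 2) with hkdef
    have hk1 : 1 ≤ k := by
      by_contra h'
      have := cnt_nonpos (show k ≤ 0 by omega)
      omega
    have hck : pvCnt k = n := by
      have := cnt_step k hk1
      omega
    simp only [A028982_alt]
    rw [max_eq_left (by omega : (1:Int) ≤ n)]
    rcases classify k n hk1 hck hr2 with ⟨i, hi, hki⟩ | ⟨j, hj, hkj⟩
    · obtain ⟨hq1, hq2⟩ := cnt_sq i hi
      set b := (Nat.sqrt ((i * i).toNat / 2) : Int) with hbdef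
      have hbn : 0 ≤ b := by positivity
      have hnib : n = i + b := by rw [hki] at hck; omega
      have hbr := pv_half_brackets (i * i) (by nlinarith)
      rw [← hbdef] at hbr
      have hs2 : (Nat.sqrt (2 * (n * n)).toNat : Int) = i + 2 * b :=
        inv1 hi hbn hbr.1 hbr.2 hnib
      have hI : 2 * n - Int.sqrt (2 * (n * n)) = i := by
        show 2 * n - (Nat.sqrt (2 * (n * n)).toNat : Int) = i
        omega
      rw [hI]
      have hcond : i + Int.sqrt ((i * i) >>> (1:Nat)) = n := by
        rw [sqrt_shift (by nlinarith), ← hbdef]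
        omega
      rw [if_pos hcond, hki]
    · obtain ⟨hq1, hq2⟩ := cnt_2sq j hj
      set c := (Nat.sqrt (2 * (j * j)).toNat : Int) with hcdef
      have hcn : 0 ≤ c := by positivity
      have hnjc : n = j + c := by rw [hkj] at hck; omega
      have hbrc := pv_brackets (2 * (j * j)) (by nlinarith)
      rw [← hcdef] at hbrc
      have hcond : ¬ (2 * n - Int.sqrt (2 * (n * n)) +
          Int.sqrt (((2 * n - Int.sqrt (2 * (n * n))) * (2 * n - Int.sqrt (2 * (n * n)))) >>> (1:Nat)) = n) := by
        intro hcond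
        set i0 := 2 * n - Int.sqrt (2 * (n * n)) with hi0def
        have hi0 : 1 ≤ i0 := by
          have := i0_pos (show (1:Int) ≤ n by omega)
          exact this
        obtain ⟨hp1, hp2⟩ := cnt_sq i0 hi0
        rw [sqrt_shift (by nlinarith)] at hcond
        have hcnd' : pvCnt (i0 * i0) = n := by rw [hp1]; omega
        have huniq : i0 * i0 = k :=
          pv_unique (n := n) (by omega) (by omega) (by omega) (by omega)
        rw [hkj] at huniq
        exact int_no_sq_two hj huniq
      rw [if_neg hcond]
      have hs2 : (Nat.sqrt (2 * ((n + 1) * (n + 1))).toNat : Int) = n + 1 + j :=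
        inv2 hj hcn hbrc.1 hbrc.2 hnjc
      have hJ : Int.sqrt (2 * ((n + 1) * (n + 1))) - (n + 1) = j := by
        show (Nat.sqrt (2 * ((n + 1) * (n + 1))).toNat : Int) - (n + 1) = j
        omega
      rw [hJ]
      exact hkj

-- ===== VERDICT (by name: the statement is the Claim_ definition above) =====
theorem A028982_spec : Claim_equal_A028982 := by
  intro n _
  exact pv_main n
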